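-- pv_equiv track=rewrite | github.com/danapaduraru/Python-Programming | practice.py | problema71
-- ===== SOURCE A (Python) =====
-- def has_duplicates(col):
--     for i in range(0, len(col) - 1):
--         for j in range(i + 1, len(col)):
--             if col[i] == col[j]:
--                 return True
--     return False
--
-- def problema71(matrix):
--     l = []
--     for i in range(0, len(matrix)):
--         has_dup = False
--         for j in range(0, len(matrix)):
--             if has_duplicates(matrix[i]):
--                 has_dup = True
--         if has_dup:
--             l.append(0)
--         else:
--             l.append(1)
--     return l
-- ===== SOURCE B (Python) =====
-- def problema71(matrix):
--     result = []
--     for row in matrix: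
--         dup = False
--         seen = []
--         for x in row:
--             if x in seen:
--                 dup = True
--                 break
--             seen.append(x)
--         result.append(0 if dup else 1)
--     return result
-- ===== Notes on version B (the rewrite author's own statement) =====
-- stated objective: faster
-- what changed: Replaces A's redundant outer j-loop and O(k^2) pairwise index scan per row by a single pass per row with a growing 'seen' list and early break.
import Mathlib
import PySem

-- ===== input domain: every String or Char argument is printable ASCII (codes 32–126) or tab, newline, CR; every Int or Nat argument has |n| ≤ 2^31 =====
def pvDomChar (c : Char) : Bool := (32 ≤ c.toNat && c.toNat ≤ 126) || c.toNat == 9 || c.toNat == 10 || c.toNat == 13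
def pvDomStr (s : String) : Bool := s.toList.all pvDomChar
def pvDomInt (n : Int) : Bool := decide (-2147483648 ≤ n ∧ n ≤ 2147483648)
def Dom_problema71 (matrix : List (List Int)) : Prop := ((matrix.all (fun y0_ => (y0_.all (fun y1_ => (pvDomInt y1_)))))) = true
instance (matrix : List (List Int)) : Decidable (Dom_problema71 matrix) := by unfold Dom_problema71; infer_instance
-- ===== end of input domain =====

-- B replaces A's redundant outer j-loop and per-row quadratic index scan by one pass per row
-- with a growing `seen` list and early exit (objective: faster).

-- ===== PORT A =====
-- has_duplicates: nested loops over index ranges, early return on a match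
def hasDuplicates (col : List Int) : Bool :=
  (List.range (col.length - 1)).any (fun i =>
    (List.range' (i + 1) (col.length - (i + 1))).any (fun j =>
      col.getD i 0 == col.getD j 0))

def problema71 (matrix : List (List Int)) : List Int :=
  (List.range matrix.length).foldl (fun l i =>
    let has_dup := (List.range matrix.length).foldl
      (fun h _ => if hasDuplicates (matrix.getD i []) then true else h) false
    l ++ [if has_dup then (0 : Int) else 1]) []

-- ===== PORT B =====
-- single pass over the row with a growing `seen` list, early break on a repeat
def dupSeen : List Int → List Int → Bool
  | [], _ => false
  | x :: xs, seen => if seen.contains x then true else dupSeen xs (seen ++ [x])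

def problema71_alt (matrix : List (List Int)) : List Int :=
  matrix.map (fun row => if dupSeen row [] then (0 : Int) else 1)

-- ===== PRECONDITION & SPEC =====
def Spec_problema71 (matrix : List (List Int)) (out : List Int) : Prop := out = problema71_alt matrix
instance (matrix : List (List Int)) (out : List Int) : Decidable (Spec_problema71 matrix out) := by unfold Spec_problema71; infer_instance

-- ===== CLAIM (what is proved, stated in full; the proofs are below) =====
def Claim_equal_problema71 : Prop := ∀ (matrix : List (List Int)), Dom_problema71 matrix → Spec_problema71 matrix (problema71 matrix)

-- ===== LEMMAS AND PROOFS =====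

-- B's scan detects exactly "not Nodup" of seen ++ rest, for Nodup seen
theorem dupSeen_eq_not_nodup (xs seen : List Int) (h : seen.Nodup) :
    dupSeen xs seen = !decide (seen ++ xs).Nodup := by
  induction xs generalizing seen with
  | nil => simp [dupSeen, h]
  | cons x xs ih =>
    by_cases hm : seen.contains x
    · simp only [dupSeen, hm, if_pos]
      have : ¬ (seen ++ x :: xs).Nodup := by
        intro hn
        rw [List.nodup_append] at hn
        exact (hn.2.2 x (by simpa using hm) x (by simp)) rfl
      simp [this]
    · have hs : (seen ++ [x]).Nodup := by
        rw [List.nodup_append]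
        refine ⟨h, List.nodup_singleton x, ?_⟩
        intro a ha b hb
        rw [List.mem_singleton] at hb; subst hb
        intro he; subst he
        exact hm (by simpa using ha)
      simp only [dupSeen, hm, if_neg, Bool.false_eq_true, not_false_iff]
      rw [ih _ hs]
      simp [List.append_assoc]

-- A's pairwise index scan detects exactly "not Nodup"
theorem hasDuplicates_eq_not_nodup (col : List Int) :
    hasDuplicates col = !decide col.Nodup := by
  have hiff : hasDuplicates col = true ↔ ¬ col.Nodup := by
    unfold hasDuplicates
    simp only [List.any_eq_true, List.mem_range, List.mem_range', one_mul]
    constructor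
    · rintro ⟨i, hi, j, ⟨k, hk, rfl⟩, hEq⟩
      intro hn
      rw [List.nodup_iff_getElem?_ne_getElem?] at hn
      have hilt : i < col.length := by omega
      have hjlt : i + 1 + k < col.length := by omega
      refine hn i (i + 1 + k) (by omega) hjlt ?_
      rw [List.getElem?_eq_getElem hilt, List.getElem?_eq_getElem hjlt]
      have := beq_iff_eq.mp hEq
      rw [List.getD_eq_getElem col 0 hilt, List.getD_eq_getElem col 0 hjlt] at this
      simpa using this
    · intro hn
      rw [List.nodup_iff_getElem?_ne_getElem?] at hn
      push Not at hn
      obtain ⟨i, j, hij, hjlt, hEq⟩ := hn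
      refine ⟨i, by omega, i + 1 + (j - (i + 1)), ⟨j - (i + 1), by omega, rfl⟩, ?_⟩
      have h2 : i + 1 + (j - (i + 1)) = j := by omega
      rw [h2]
      have hilt : i < col.length := by omega
      rw [List.getElem?_eq_getElem hilt, List.getElem?_eq_getElem hjlt] at hEq
      simp only [Option.some.injEq] at hEq
      rw [List.getD_eq_getElem col 0 hilt, List.getD_eq_getElem col 0 hjlt]
      exact beq_iff_eq.mpr hEq
  cases hnd : decide col.Nodup
  · simp only [Bool.not_false]
    exact hiff.mpr (by simpa using hnd)
  · simp only [Bool.not_true]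
    by_contra hc
    exact absurd (hiff.mp (by simpa using hc)) (by simpa using hnd)

-- the redundant inner fold is just its condition when the range is nonempty
theorem const_fold (b : Bool) (n : Nat) (hn : 0 < n) :
    (List.range n).foldl (fun h _ => if b then true else h) false = b := by
  induction n with
  | zero => omega
  | succ m ih =>
    rw [List.range_succ, List.foldl_append]
    cases Nat.eq_zero_or_pos m with
    | inl h0 => subst h0; cases b <;> simp
    | inr hpos => rw [ih hpos]; cases b <;> simp

theorem fold_append_map (n : Nat) (f : Nat → Int) (acc : List Int) :
    (List.range n).foldl (fun l i => l ++ [f i]) acc = acc ++ (List.range n).map f := by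
  induction n generalizing acc with
  | zero => simp
  | succ m ih => rw [List.range_succ]; simp [ih]

-- ===== VERDICT (by name: the statement is the Claim_ definition above) =====
theorem problema71_spec : Claim_equal_problema71 := by
  intro matrix _
  show problema71 matrix = problema71_alt matrix
  unfold problema71 problema71_alt
  rw [fold_append_map matrix.length
    (fun i => if (List.range matrix.length).foldl
      (fun h _ => if hasDuplicates (matrix.getD i []) then true else h) false then (0 : Int) else 1) []]
  rw [List.nil_append]
  apply List.ext_getElem
  · simp
  · intro i h1 h2
    simp only [List.getElem_map, List.getElem_range]
    have hlen : 0 < matrix.length := by simp at h1; omega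
    have hi : i < matrix.length := by simpa using h1
    rw [const_fold _ _ hlen, hasDuplicates_eq_not_nodup,
      dupSeen_eq_not_nodup _ [] List.nodup_nil, List.nil_append,
      List.getD_eq_getElem matrix [] hi]
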